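-- pv_equiv track=rewrite | github.com/taaaaryu/lab | Opti/cdf-comb_service.py | generate_service_combinations
-- ===== SOURCE A (Python) =====
-- from itertools import combinations, chain
--
-- num_software = 3
--
-- def generate_service_combinations(services):
--     all_combinations = []
--     n = len(services)
--     for indices in combinations(range(n - 1), num_software - 1):
--         split_indices = list(chain([-1], indices, [n - 1]))
--         combination = [services[split_indices[i] + 1: split_indices[i + 1] + 1] for i in range(len(split_indices) - 1)]
--         all_combinations.append(combination)
--     return all_combinations
-- ===== SOURCE B (Python) =====
-- num_software = 3
--
-- def generate_service_combinations(services):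
--     def partition(lst, k):
--         if k == 1:
--             return [[lst]]
--         result = []
--         for first_len in range(1, len(lst) - (k - 1) + 1):
--             head = lst[:first_len]
--             for tail in partition(lst[first_len:], k - 1):
--                 result.append([head] + tail)
--         return result
--     return partition(services, num_software)
-- ===== Notes on version B (the rewrite author's own statement) =====
-- stated objective: alternative
-- what changed: replaces the global enumeration of split-index pairs via itertools.combinations plus slicing by split indices with a recursive head/tail decomposition that peels off the first group and recursively partitions the remainder
import Mathlib
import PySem

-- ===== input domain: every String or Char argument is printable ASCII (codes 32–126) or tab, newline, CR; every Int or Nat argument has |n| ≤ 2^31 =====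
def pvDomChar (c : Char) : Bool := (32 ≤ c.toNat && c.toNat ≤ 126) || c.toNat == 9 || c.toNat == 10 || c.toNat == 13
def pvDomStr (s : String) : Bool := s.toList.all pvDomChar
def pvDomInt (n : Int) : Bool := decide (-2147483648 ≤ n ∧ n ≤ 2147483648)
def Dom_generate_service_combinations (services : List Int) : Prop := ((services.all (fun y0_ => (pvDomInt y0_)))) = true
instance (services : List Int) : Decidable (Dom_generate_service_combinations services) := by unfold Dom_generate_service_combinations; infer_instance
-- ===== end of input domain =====

-- B replaces A's itertools.combinations split-index enumeration by a recursive head/tail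
-- decomposition (peel off the first group, recurse on the rest); same values, same order.

-- ===== PORT A =====
-- itertools.combinations(l, k): the k-subsequences of l in lexicographic order (A uses k = 2)
def pyCombos {α : Type} : Nat → List α → List (List α)
  | 0, _ => [[]]
  | _ + 1, [] => []
  | k + 1, x :: xs => ((pyCombos k xs).map (fun c => x :: c)) ++ pyCombos (k + 1) xs

def generate_service_combinations (services : List Int) : List (List (List Int)) :=
  let n : Int := services.length
  (pyCombos 2 (PySem.List.pyRange 0 (n - 1) 1)).foldl
    (fun acc indices =>
      let split : List Int := [-1] ++ indices ++ [n - 1]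
      let combination :=
        (PySem.List.pyRange 0 ((split.length : Int) - 1) 1).map
          (fun i => PySem.List.slice services
              (some (PySem.List.pyGetD split i 0 + 1))
              (some (PySem.List.pyGetD split (i + 1) 0 + 1)))
      acc ++ [combination]) []

-- ===== PORT B =====
-- partition(lst, k); Python recurses on k downwards, called only with k = num_software = 3
-- (the 0 case is unreachable from the entry point, where Python would not terminate)
def partB : List Int → Nat → List (List (List Int))
  | _, 0 => []
  | lst, 1 => [[lst]]
  | lst, k + 2 =>
    (PySem.List.pyRange 1 ((lst.length : Int) - ((k + 2 : Nat) - 1 : Nat) + 1) 1).foldl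
      (fun acc first_len =>
        let head := PySem.List.slice lst none (some first_len)
        acc ++ (partB (PySem.List.slice lst (some first_len) none) (k + 1)).map
          (fun tail => head :: tail)) []

def generate_service_combinations_alt (services : List Int) : List (List (List Int)) :=
  partB services 3

-- ===== PRECONDITION & SPEC =====
def Spec_generate_service_combinations (services : List Int) (out : List (List (List Int))) : Prop := out = generate_service_combinations_alt services
instance (services : List Int) (out : List (List (List Int))) : Decidable (Spec_generate_service_combinations services out) := by unfold Spec_generate_service_combinations; infer_instance

-- ===== CLAIM (what is proved, stated in full; the proofs are below) =====
def Claim_equal_generate_service_combinations : Prop := ∀ (services : List Int), Dom_generate_service_combinations services → Spec_generate_service_combinations services (generate_service_combinations services)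

-- ===== LEMMAS AND PROOFS =====

-- common normal form: outer i = first group length - 1, inner d = second group length - 1
def normF (xs : List Int) : Nat → List (List (List Int)) :=
  fun m => (List.range m).flatMap
    (fun i => (List.range (xs.length - (i + 2))).map
      (fun d => [xs.take (i + 1), (xs.drop (i + 1)).take (d + 1), (xs.drop (i + 1)).drop (d + 1)]))

lemma pyCombos_one {α : Type} (l : List α) : pyCombos 1 l = l.map (fun x => [x]) := by
  induction l with
  | nil => rfl
  | cons x xs ih => simp [pyCombos, ih]

lemma pyCombos_two (a b : Int) :
    pyCombos 2 (PySem.List.pyRange a b 1) =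
      (PySem.List.pyRange a b 1).flatMap
        (fun i => (PySem.List.pyRange (i + 1) b 1).map (fun j => [i, j])) := by
  generalize hn : (b - a).toNat = n
  induction n generalizing a with
  | zero =>
    rw [PySem.List.pyRange_one_eq_nil (by omega)]; rfl
  | succ n ih =>
    have hab : a < b := by omega
    rw [PySem.List.pyRange_one_cons hab]
    show ((pyCombos 1 _).map _) ++ _ = _
    rw [pyCombos_one, ih (a + 1) (by omega)]
    simp [List.map_map, Function.comp]

-- the inner list comprehension of A, evaluated on split_indices = [-1, i, j, n-1]
lemma combA (xs : List Int) (i j n : Int) :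
    (PySem.List.pyRange 0 ((([(-1 : Int)] ++ [i, j] ++ [n - 1]).length : Int) - 1) 1).map
      (fun t => PySem.List.slice xs
          (some (PySem.List.pyGetD ([(-1 : Int)] ++ [i, j] ++ [n - 1]) t 0 + 1))
          (some (PySem.List.pyGetD ([(-1 : Int)] ++ [i, j] ++ [n - 1]) (t + 1) 0 + 1)))
    = [PySem.List.slice xs none (some (i + 1)),
       PySem.List.slice xs (some (i + 1)) (some (j + 1)),
       PySem.List.slice xs (some (j + 1)) (some n)] := by
  have h3 : PySem.List.pyRange 0 (3 : Int) 1 = [0, 1, 2] := by decide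
  simp only [List.cons_append, List.nil_append, List.length_cons, List.length_nil]
  norm_num [h3, PySem.List.pyGetD, PySem.List.pyGet?, PySem.List.pyIdx?,
    List.getElem_cons_succ, List.getElem_cons_zero,
    show Int.toNat 2 = 2 from rfl, show Int.toNat 3 = 3 from rfl]

lemma rangeShift (a b : Int) (m s : Nat) (hm : (b - a).toNat = m) (hs : a = (s : Int)) :
    PySem.List.pyRange a b 1 = (List.range m).map (fun d => ((s + d : Nat) : Int)) := by
  rw [PySem.List.pyRange_one, hm]
  apply List.map_congr_left
  intro t _
  subst hs; push_cast; ring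

lemma innerA (xs : List Int) (k : Nat) :
    (PySem.List.pyRange ((k : Int) + 1) ((xs.length : Int) - 1) 1).map
      (fun j => [PySem.List.slice xs none (some ((k : Int) + 1)),
                 PySem.List.slice xs (some ((k : Int) + 1)) (some (j + 1)),
                 PySem.List.slice xs (some (j + 1)) (some (xs.length : Int))])
    = (List.range (xs.length - (k + 2))).map
      (fun d => [xs.take (k + 1), (xs.drop (k + 1)).take (d + 1), (xs.drop (k + 1)).drop (d + 1)]) := by
  rw [rangeShift _ _ (xs.length - (k + 2)) (k + 1) (by omega) (by push_cast; ring), List.map_map]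
  apply List.map_congr_left
  intro d hd
  simp only [Function.comp]
  have e1 : ((k : Int) + 1) = ((k + 1 : Nat) : Int) := by push_cast; ring
  have e2 : ((k + 1 + d : Nat) : Int) + 1 = ((k + 1 + d + 1 : Nat) : Int) := by push_cast; ring
  rw [e1, e2, PySem.List.slice_to_natCast, PySem.List.slice_natCast, PySem.List.slice_natCast]
  have h4 : k + 1 + d + 1 - (k + 1) = d + 1 := by omega
  rw [h4]
  have t3 : (xs.drop (k + 1 + d + 1)).take (xs.length - (k + 1 + d + 1))
      = (xs.drop (k + 1)).drop (d + 1) := by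
    rw [List.take_of_length_le (by simp), List.drop_drop]
    congr 1
  rw [t3]

lemma portA_norm (xs : List Int) :
    generate_service_combinations xs = normF xs (xs.length - 1) := by
  unfold generate_service_combinations
  rw [PySem.List.foldl_append_singleton_eq_map, pyCombos_two]
  simp only [List.nil_append, List.map_flatMap, List.map_map]
  rw [rangeShift 0 ((xs.length : Int) - 1) (xs.length - 1) 0 (by omega) (by norm_num)]
  rw [List.flatMap_map]
  unfold normF
  apply List.flatMap_congr
  intro k hk
  simp only [Function.comp_def, Nat.zero_add, combA]
  exact innerA xs k

lemma flatMap_single {A B : Type} (l : List A) (f : A → B) :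
    l.flatMap (fun x => [f x]) = l.map f := by
  induction l with
  | nil => rfl
  | cons x xs ih => simp [ih]

lemma partB_two (ys : List Int) :
    partB ys 2 = (List.range (ys.length - 1)).map (fun d => [ys.take (d + 1), ys.drop (d + 1)]) := by
  show (PySem.List.pyRange 1 ((ys.length : Int) - ((2 : Nat) - 1 : Nat) + 1) 1).foldl _ [] = _
  rw [PySem.List.foldl_append_eq_flatMap]
  rw [rangeShift _ _ (ys.length - 1) 1 (by omega) (by norm_num)]
  rw [List.flatMap_map, List.nil_append]
  simp only [partB, PySem.List.slice_to_natCast, PySem.List.slice_from_natCast,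
    List.map_cons, List.map_nil]
  rw [flatMap_single]
  apply List.map_congr_left
  intro d _
  simp [Nat.add_comm 1 d]

lemma portB_norm (xs : List Int) :
    generate_service_combinations_alt xs = normF xs (xs.length - 2) := by
  show (PySem.List.pyRange 1 ((xs.length : Int) - ((3 : Nat) - 1 : Nat) + 1) 1).foldl _ [] = _
  rw [PySem.List.foldl_append_eq_flatMap, List.nil_append]
  rw [rangeShift _ _ (xs.length - 2) 1 (by omega) (by norm_num)]
  rw [List.flatMap_map]
  unfold normF
  apply List.flatMap_congr
  intro e he
  simp only [Function.comp_def, PySem.List.slice_to_natCast, PySem.List.slice_from_natCast,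
    show (1 + 1 : Nat) = 2 from rfl, partB_two, List.map_map, List.length_drop]
  rw [show 1 + e = e + 1 from by omega,
    show xs.length - (e + 1) - 1 = xs.length - (e + 2) from by omega]

-- ===== VERDICT (by name: the statement is the Claim_ definition above) =====
theorem generate_service_combinations_spec : Claim_equal_generate_service_combinations := by
  intro xs _
  show _ = _
  rw [portA_norm, portB_norm]
  rcases Nat.lt_or_ge xs.length 2 with h | h
  · have : xs.length - 1 = xs.length - 2 := by omega
    rw [this]
  · have h1 : xs.length - 1 = (xs.length - 2) + 1 := by omega
    rw [h1, normF, List.range_succ, List.flatMap_append]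
    have h2 : xs.length - (xs.length - 2 + 2) = 0 := by omega
    simp [normF, List.drop_drop, Nat.add_comm]
    omega
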